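-- pv_equiv track=rewrite | github.com/hangisu30-arch/autopj | app/validation/runtime_smoke.py | _representative_auth_smoke_routes
-- ===== SOURCE A (Python) =====
-- from typing import Any, Dict, List, Optional, Tuple
--
-- def _representative_auth_smoke_routes(routes: List[str]) -> List[str]:
--     auth_routes = [route for route in routes if route.lower().startswith('/login/')]
--     if not auth_routes:
--         return routes
--
--     # Keep exactly one representative auth page. actionMain/main routes are session-dependent
--     # and tend to collapse into the same redirect chain as login.do during smoke.
--     preferred_exact = (
--         '/login/login.do',
--         '/login/main.do',
--     )
--     selected: List[str] = []
--     seen = set()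
--     for target in preferred_exact:
--         for route in auth_routes:
--             if route.lower() == target and route not in seen:
--                 seen.add(route)
--                 selected.append(route)
--                 break
--         if selected:
--             break
--     if not selected:
--         for route in auth_routes:
--             low = route.lower()
--             if low.endswith('/actionmain.do'):
--                 continue
--             if route not in seen:
--                 seen.add(route)
--                 selected.append(route)
--                 break
--     if not selected and auth_routes:
--         selected.append(auth_routes[0])
--
--     non_auth = [route for route in routes if route.lower() not in {item.lower() for item in auth_routes}]
--     return selected + non_auth
-- ===== SOURCE B (Python) =====
-- def _representative_auth_smoke_routes(routes):
--     auth_routes = [route for route in routes if route.lower().startswith('/login/')]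
--     if not auth_routes:
--         return routes
--
--     def priority(route):
--         low = route.lower()
--         if low == '/login/login.do':
--             return 0
--         if low == '/login/main.do':
--             return 1
--         return 2 if not low.endswith('/actionmain.do') else 3
--
--     # min is stable: it returns the FIRST route of minimal priority, matching
--     # the original's first-occurrence scans.
--     selected = [min(auth_routes, key=priority)]
--     non_auth = [route for route in routes if not route.lower().startswith('/login/')]
--     return selected + non_auth
-- ===== Notes on version B (the rewrite author's own statement) =====
-- stated objective: simpler
-- what changed: Replaced the nested preferred-exact scans, the seen set and the two fallback loops with a single 4-level priority function and one stable min over the auth routes; the non-auth filter is a direct startswith test instead of rebuilding a lowercased set of auth routes.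
import Mathlib
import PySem

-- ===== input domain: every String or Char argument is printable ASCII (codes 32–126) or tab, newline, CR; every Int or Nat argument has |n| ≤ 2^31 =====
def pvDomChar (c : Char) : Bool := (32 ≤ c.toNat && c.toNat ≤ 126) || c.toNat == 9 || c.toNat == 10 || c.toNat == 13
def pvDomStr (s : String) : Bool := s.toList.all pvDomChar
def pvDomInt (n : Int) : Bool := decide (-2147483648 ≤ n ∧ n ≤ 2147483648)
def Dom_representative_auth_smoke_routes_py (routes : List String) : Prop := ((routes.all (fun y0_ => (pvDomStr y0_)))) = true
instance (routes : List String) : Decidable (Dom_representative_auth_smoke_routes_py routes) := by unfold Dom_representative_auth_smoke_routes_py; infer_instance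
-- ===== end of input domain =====

-- B replaces A's nested preferred-exact scans / seen set / fallback loops by one stable
-- min over a 4-level priority function (objective: simpler; same return value).

-- ===== PORT A =====
-- `for route in auth_routes: if route.lower() == target and route not in seen: …; break`
def pvPickTarget (auth : List String) (target : String) (seen : PySem.Set String) : Option String :=
  match auth with
  | [] => none
  | r :: rs =>
    if (PySem.Str.lower r == target) && !(PySem.Set.contains seen r) then some r
    else pvPickTarget rs target seen

-- `for target in preferred_exact: …; if selected: break`
def pvOuterLoop (targets : List String) (auth : List String) (selected : List String)
    (seen : PySem.Set String) : List String × PySem.Set String :=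
  match targets with
  | [] => (selected, seen)
  | t :: ts =>
    match pvPickTarget auth t seen with
    | some r =>
      let seen := PySem.Set.add seen r
      let selected := selected ++ [r]
      if selected = [] then pvOuterLoop ts auth selected seen else (selected, seen)
    | none =>
      if selected = [] then pvOuterLoop ts auth selected seen else (selected, seen)

-- the second `for route in auth_routes` loop (skip actionmain, take first unseen)
def pvLoop2 (auth : List String) (seen : PySem.Set String) : Option String :=
  match auth with
  | [] => none
  | r :: rs =>
    let low := PySem.Str.lower r
    if PySem.Str.endswith low "/actionmain.do" then pvLoop2 rs seen
    else if !(PySem.Set.contains seen r) then some r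
    else pvLoop2 rs seen

def representative_auth_smoke_routes_py (routes : List String) : List String :=
  let auth := routes.filter (fun r => PySem.Str.startswith (PySem.Str.lower r) "/login/")
  match auth with
  | [] => routes
  | a0 :: rest =>
    let sel_seen := pvOuterLoop ["/login/login.do", "/login/main.do"] (a0 :: rest) [] PySem.Set.empty
    let selected := sel_seen.1
    let seen := sel_seen.2
    let selected :=
      if selected = [] then
        match pvLoop2 (a0 :: rest) seen with
        | some r => selected ++ [r]
        | none => selected
      else selected
    let selected := if selected = [] then selected ++ [a0] else selected
    let authLowers := PySem.Set.ofList ((a0 :: rest).map PySem.Str.lower)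
    selected ++ routes.filter (fun r => !(PySem.Set.contains authLowers (PySem.Str.lower r)))

-- ===== PORT B =====
def pvRank (r : String) : Nat :=
  let low := PySem.Str.lower r
  if low == "/login/login.do" then 0
  else if low == "/login/main.do" then 1
  else if !(PySem.Str.endswith low "/actionmain.do") then 2
  else 3

def representative_auth_smoke_routes_py_alt (routes : List String) : List String :=
  let auth := routes.filter (fun r => PySem.Str.startswith (PySem.Str.lower r) "/login/")
  if auth = [] then routes
  else
    -- selected = [min(auth_routes, key=priority)]; min? is `some` since auth ≠ []
    let selected := (PySem.List.min? auth pvRank).toList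
    selected ++ routes.filter (fun r => !(PySem.Str.startswith (PySem.Str.lower r) "/login/"))

-- ===== PRECONDITION & SPEC =====
def Spec_representative_auth_smoke_routes_py (routes : List String) (out : List String) : Prop := out = representative_auth_smoke_routes_py_alt routes
instance (routes : List String) (out : List String) : Decidable (Spec_representative_auth_smoke_routes_py routes out) := by unfold Spec_representative_auth_smoke_routes_py; infer_instance

-- ===== CLAIM (what is proved, stated in full; the proofs are below) =====
def Claim_equal_representative_auth_smoke_routes_py : Prop := ∀ (routes : List String), Dom_representative_auth_smoke_routes_py routes → Spec_representative_auth_smoke_routes_py routes (representative_auth_smoke_routes_py routes)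

-- ===== LEMMAS AND PROOFS =====

def pvP0 (r : String) : Bool := PySem.Str.lower r == "/login/login.do"
def pvP1 (r : String) : Bool := PySem.Str.lower r == "/login/main.do"
def pvP2 (r : String) : Bool := !(PySem.Str.endswith (PySem.Str.lower r) "/actionmain.do")

-- A's cascade: first /login/login.do, else first /login/main.do, else first
-- non-actionmain route, else the head of the auth list.
def pvCasc (auth : List String) (a0 : String) : String :=
  match auth.find? pvP0 with
  | some r => r
  | none =>
    match auth.find? pvP1 with
    | some r => r
    | none =>
      match auth.find? pvP2 with
      | some r => r
      | none => a0

def pvStep (b x : String) : String := if pvRank x < pvRank b then x else b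

theorem pvRank_eq (r : String) :
    pvRank r = if pvP0 r then 0 else if pvP1 r then 1 else if pvP2 r then 2 else 3 := rfl

theorem pvContains_empty (r : String) : PySem.Set.contains PySem.Set.empty r = false := rfl

theorem pvPickTarget_empty (auth : List String) (t : String) :
    pvPickTarget auth t PySem.Set.empty = auth.find? (fun r => PySem.Str.lower r == t) := by
  induction auth with
  | nil => rfl
  | cons r rs ih =>
    cases h : (PySem.Str.lower r == t) <;>
      first
        | (simp [pvPickTarget, h]; done)
        | (simp [pvPickTarget, h]; exact ih)

theorem pvPick0 (auth : List String) :
    pvPickTarget auth "/login/login.do" PySem.Set.empty = auth.find? pvP0 := by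
  rw [pvPickTarget_empty]; rfl

theorem pvPick1 (auth : List String) :
    pvPickTarget auth "/login/main.do" PySem.Set.empty = auth.find? pvP1 := by
  rw [pvPickTarget_empty]; rfl

theorem pvLoop2_empty (auth : List String) :
    pvLoop2 auth PySem.Set.empty = auth.find? pvP2 := by
  induction auth with
  | nil => rfl
  | cons r rs ih =>
    cases h : PySem.Str.endswith (PySem.Str.lower r) "/actionmain.do"
    · simp only [pvLoop2, pvContains_empty, h, Bool.not_false, if_true, if_false,
        List.find?_cons, pvP2, Bool.false_eq_true]
    · simp only [pvLoop2, h, if_true, List.find?_cons, pvP2, Bool.not_true, ih]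

theorem pvOuterLoop_reduce (auth : List String) :
    pvOuterLoop ["/login/login.do", "/login/main.do"] auth [] PySem.Set.empty =
      match auth.find? pvP0 with
      | some r => ([r], PySem.Set.add PySem.Set.empty r)
      | none =>
        match auth.find? pvP1 with
        | some r => ([r], PySem.Set.add PySem.Set.empty r)
        | none => ([], PySem.Set.empty) := by
  simp only [pvOuterLoop, pvPick0, pvPick1]
  rcases h0 : auth.find? pvP0 with _ | r0 <;> rcases h1 : auth.find? pvP1 with _ | r1 <;>
    simp only [h0, h1] <;> simp

theorem pvMin?_cons (rest : List String) (a0 : String) :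
    PySem.List.min? (a0 :: rest) pvRank = some (rest.foldl pvStep a0) := by
  induction rest generalizing a0 with
  | nil => rfl
  | cons x xs ih =>
    have ihx := ih x
    have iha := ih a0
    simp only [PySem.List.min?, List.foldl] at ihx iha ⊢
    by_cases h : pvRank x < pvRank a0 <;> simp [h, pvStep, ihx, iha]

set_option maxHeartbeats 1000000 in
theorem pvFoldl_eq_casc (rest : List String) (a0 : String) :
    rest.foldl pvStep a0 = pvCasc (a0 :: rest) a0 := by
  induction rest generalizing a0 with
  | nil =>
    cases h0 : pvP0 a0 <;> cases h1 : pvP1 a0 <;> cases h2 : pvP2 a0 <;>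
      simp [pvCasc, List.find?_cons, h0, h1, h2]
  | cons x rest ih =>
    have hstep : List.foldl pvStep a0 (x :: rest) = List.foldl pvStep (pvStep a0 x) rest := rfl
    rw [hstep, ih]
    cases h0 : pvP0 a0 <;> cases h1 : pvP1 a0 <;> cases h2 : pvP2 a0 <;>
      cases g0 : pvP0 x <;> cases g1 : pvP1 x <;> cases g2 : pvP2 x <;>
        simp [pvCasc, pvStep, pvRank_eq, List.find?_cons, h0, h1, h2, g0, g1, g2]

theorem pvFilter_eq (routes : List String) :
    routes.filter
        (fun r =>
          !(PySem.Set.contains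
              (PySem.Set.ofList
                ((routes.filter (fun r => PySem.Str.startswith (PySem.Str.lower r) "/login/")).map
                  PySem.Str.lower))
              (PySem.Str.lower r))) =
      routes.filter (fun r => !(PySem.Str.startswith (PySem.Str.lower r) "/login/")) := by
  apply List.filter_congr
  intro r hr
  congr 1
  cases h : PySem.Str.startswith (PySem.Str.lower r) "/login/"
  · simp only [PySem.Set.contains, List.contains_eq_mem, decide_eq_false_iff_not]
    intro hmem
    rw [PySem.Set.mem_ofList] at hmem
    rcases List.mem_map.mp hmem with ⟨a, ha, hla⟩
    have hsw : PySem.Str.startswith (PySem.Str.lower a) "/login/" = true :=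
      (List.mem_filter.mp ha).2
    rw [hla, h] at hsw
    exact Bool.noConfusion hsw
  · simp only [PySem.Set.contains, List.contains_eq_mem, decide_eq_true_iff]
    rw [PySem.Set.mem_ofList]
    exact List.mem_map_of_mem (List.mem_filter.mpr ⟨hr, h⟩)

-- A's whole selection block equals [pvCasc auth a0]
theorem pvSelected_eq (a0 : String) (rest : List String) :
    (let sel_seen := pvOuterLoop ["/login/login.do", "/login/main.do"] (a0 :: rest) [] PySem.Set.empty
     let selected := sel_seen.1
     let seen := sel_seen.2
     let selected :=
       if selected = [] then
         match pvLoop2 (a0 :: rest) seen with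
         | some r => selected ++ [r]
         | none => selected
       else selected
     if selected = [] then selected ++ [a0] else selected) = [pvCasc (a0 :: rest) a0] := by
  rw [pvOuterLoop_reduce]
  rcases h0 : (a0 :: rest).find? pvP0 with _ | r0 <;>
    rcases h1 : (a0 :: rest).find? pvP1 with _ | r1 <;>
      simp only []
  · rw [pvLoop2_empty]
    rcases h2 : (a0 :: rest).find? pvP2 with _ | r2 <;> simp [pvCasc, h0, h1, h2]
  · simp [pvCasc, h0, h1]
  · simp [pvCasc, h0, h1]
  · simp [pvCasc, h0, h1]

-- ===== VERDICT (by name: the statement is the Claim_ definition above) =====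
theorem representative_auth_smoke_routes_py_spec : Claim_equal_representative_auth_smoke_routes_py := by
  intro routes _
  show representative_auth_smoke_routes_py routes = representative_auth_smoke_routes_py_alt routes
  unfold representative_auth_smoke_routes_py representative_auth_smoke_routes_py_alt
  rcases hauth : routes.filter (fun r => PySem.Str.startswith (PySem.Str.lower r) "/login/") with _ | ⟨a0, rest⟩
  · simp
  · simp only [List.cons_ne_self, if_neg, reduceCtorEq, not_false_iff]
    rw [pvSelected_eq a0 rest]
    rw [pvMin?_cons, pvFoldl_eq_casc]
    have hf := pvFilter_eq routes
    rw [hauth] at hf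
    rw [hf]
    rfl
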